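-- pv_equiv track=rewrite | github.com/kamigoroshii/StrideSense | final_solution.py | calculate_min_contributions
-- ===== SOURCE A (Python) =====
-- def calculate_min_contributions(A):
--     """Calculate how many subarrays each element contributes as minimum"""
--     n = len(A)
--     contributions = [0] * n
--
--     # Find previous greater element for each index
--     prev_greater = [-1] * n
--     stack = []
--     for i in range(n):
--         while stack and A[stack[-1]] >= A[i]:
--             stack.pop()
--         if stack:
--             prev_greater[i] = stack[-1]
--         stack.append(i)
--
--     # Find next greater element for each index
--     next_greater = [n] * n
--     stack = []
--     for i in range(n-1, -1, -1):
--         while stack and A[stack[-1]] >= A[i]: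
--             stack.pop()
--         if stack:
--             next_greater[i] = stack[-1]
--         stack.append(i)
--
--     # Calculate contributions
--     for i in range(n):
--         left_count = i - prev_greater[i]
--         right_count = next_greater[i] - i
--         contributions[i] = left_count * right_count
--
--     return contributions
-- ===== SOURCE B (Python) =====
-- def calculate_min_contributions(A):
--     """Calculate how many subarrays each element contributes as minimum"""
--     n = len(A)
--     res = []
--     for i in range(n):
--         v = A[i]
--         left = 1
--         k = i - 1
--         while k >= 0 and A[k] >= v:
--             left += 1
--             k -= 1
--         right = 1
--         k = i + 1
--         while k < n and A[k] >= v: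
--             right += 1
--             k += 1
--         res.append(left * right)
--     return res
-- ===== Notes on version B (the rewrite author's own statement) =====
-- stated objective: simpler
-- what changed: Replaces the two monotonic-stack passes building prev/next boundary tables with a single loop that, for each index, scans left and right directly counting contiguous elements >= A[i].
import Mathlib
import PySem

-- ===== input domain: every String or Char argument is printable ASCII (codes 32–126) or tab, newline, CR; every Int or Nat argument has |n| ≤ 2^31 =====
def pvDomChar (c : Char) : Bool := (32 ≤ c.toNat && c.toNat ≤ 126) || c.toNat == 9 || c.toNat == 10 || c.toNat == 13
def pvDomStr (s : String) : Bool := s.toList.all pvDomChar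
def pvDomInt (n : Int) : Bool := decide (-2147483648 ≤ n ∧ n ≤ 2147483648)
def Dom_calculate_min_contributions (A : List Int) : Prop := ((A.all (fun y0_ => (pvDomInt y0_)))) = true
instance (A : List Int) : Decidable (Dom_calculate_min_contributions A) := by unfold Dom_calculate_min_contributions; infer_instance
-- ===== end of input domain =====

-- B replaces A's two monotonic-stack passes by direct local left/right scans per index (simpler, no tables; not faster).

-- ===== PORT A =====
-- the inner `while stack and A[stack[-1]] >= A[i]: stack.pop()` loop (stack head = Python stack top)
def popWhile (A : List Int) (v : Int) : List Nat → List Nat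
  | [] => []
  | j :: s => if A.getD j 0 ≥ v then popWhile A v s else j :: s

-- one iteration of either stack loop's body: pop, record stack top (if any) at index i, push i.
-- (both Python loops have this same body; they differ only in iteration order and the array written)
def stepPG (A : List Int) (st : List Int × List Nat) (i : Nat) : List Int × List Nat :=
  let s := popWhile A (A.getD i 0) st.2
  (match s with
   | [] => st.1
   | j :: _ => st.1.set i (j : Int), i :: s)

def calculate_min_contributions (A : List Int) : List Int :=
  let n := A.length
  -- for i in range(n): … prev_greater
  let prev := ((List.range n).foldl (stepPG A) (List.replicate n (-1), [])).1
  -- for i in range(n-1,-1,-1): … next_greater  (range(n-1,-1,-1) = reversed range(n))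
  let next := ((List.range n).reverse.foldl (stepPG A) (List.replicate n (n : Int), [])).1
  -- contributions[i] = (i - prev_greater[i]) * (next_greater[i] - i)
  (List.range n).map (fun (i : Nat) => ((i : Int) - prev.getD i 0) * (next.getD i 0 - (i : Int)))

-- ===== PORT B =====
-- the while-scan of Source B: number of leading elements ≥ v (left scan runs it on the reversed prefix,
-- visiting the same elements in the same order as Source B's downward index loop)
def cntGe : List Int → Int → Nat
  | [], _ => 0
  | x :: xs, v => if x ≥ v then cntGe xs v + 1 else 0

def calculate_min_contributions_alt (A : List Int) : List Int :=
  (List.range A.length).map (fun i =>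
    let v := A.getD i 0
    (1 + (cntGe ((A.take i).reverse) v : Int)) * (1 + (cntGe (A.drop (i+1)) v : Int)))

-- ===== PRECONDITION & SPEC =====
def Spec_calculate_min_contributions (A : List Int) (out : List Int) : Prop := out = calculate_min_contributions_alt A
instance (A : List Int) (out : List Int) : Decidable (Spec_calculate_min_contributions A out) := by unfold Spec_calculate_min_contributions; infer_instance

-- ===== CLAIM (what is proved, stated in full; the proofs are below) =====
def Claim_equal_calculate_min_contributions : Prop := ∀ (A : List Int), Dom_calculate_min_contributions A → Spec_calculate_min_contributions A (calculate_min_contributions A)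

-- ===== LEMMAS AND PROOFS =====

theorem popWhile_eq_dropWhile (A : List Int) (v : Int) (s : List Nat) :
    popWhile A v s = s.dropWhile (fun j => decide (A.getD j 0 ≥ v)) := by
  induction s with
  | nil => rfl
  | cons j t ih =>
    simp only [popWhile, List.dropWhile]
    by_cases h : A.getD j 0 ≥ v <;>
      [skip; skip] <;> simp only [List.getD_eq_getElem?_getD] at h ⊢ <;> simp [h, ih]

theorem dropWhile_dropWhile {α : Type} (p q : α → Bool) (h : ∀ x, q x = true → p x = true)
    (l : List α) : (l.dropWhile q).dropWhile p = l.dropWhile p := by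
  induction l with
  | nil => rfl
  | cons x t ih =>
    by_cases hq : q x = true
    · have hp := h x hq
      simp [List.dropWhile_cons, hq, hp, ih]
    · simp [List.dropWhile_cons, hq]

theorem find?_eq_head?_dropWhile {α : Type} (p : α → Bool) (l : List α) :
    l.find? p = (l.dropWhile (fun x => !p x)).head? := by
  induction l with
  | nil => rfl
  | cons x t ih =>
    by_cases hx : p x = true <;> simp [List.find?_cons, List.dropWhile_cons, hx, ih]

theorem cntGe_eq (l : List Int) (v : Int) :
    cntGe l v = (l.takeWhile (fun x => decide (x ≥ v))).length := by
  induction l with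
  | nil => rfl
  | cons x t ih =>
    by_cases h : x ≥ v <;> simp [cntGe, List.takeWhile_cons, h, ih]

theorem dropWhile_eq_drop {α : Type} (p : α → Bool) (l : List α) :
    l.dropWhile p = l.drop (l.takeWhile p).length := by
  induction l with
  | nil => rfl
  | cons x t ih =>
    by_cases h : p x = true <;> simp [List.dropWhile_cons, List.takeWhile_cons, h, ih]

-- stack contents after the ascending loop has processed indices 0..i-1
def visL (A : List Int) : Nat → List Nat
  | 0 => []
  | i+1 => i :: ((visL A i).dropWhile (fun j => decide (A.getD j 0 ≥ A.getD i 0)))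

-- stack contents after the descending loop has processed k indices (n-1 down to n-k)
def visR (A : List Int) : Nat → List Nat
  | 0 => []
  | k+1 => (A.length - 1 - k) ::
      ((visR A k).dropWhile (fun j => decide (A.getD j 0 ≥ A.getD (A.length - 1 - k) 0)))

theorem keyL (A : List Int) : ∀ (i : Nat) (v : Int),
    ((visL A i).dropWhile (fun j => decide (A.getD j 0 ≥ v))).head?
      = (List.range i).reverse.find? (fun j => decide (A.getD j 0 < v)) := by
  intro i
  induction i with
  | zero => intro v; rfl
  | succ i ih =>
    intro v
    have hrev : (List.range (i+1)).reverse = i :: (List.range i).reverse := by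
      rw [List.range_succ, List.reverse_append]; rfl
    rw [hrev]
    by_cases h : A.getD i 0 ≥ v
    · have hnl : ¬ (A.getD i 0 < v) := not_lt.mpr h
      simp only [visL, List.dropWhile_cons, List.find?_cons, decide_eq_true_eq, h, hnl,
        if_true, decide_true, decide_false]
      rw [dropWhile_dropWhile (fun j => decide (A.getD j 0 ≥ v))
        (fun j => decide (A.getD j 0 ≥ A.getD i 0))
        (by intro x hx; simp only [decide_eq_true_eq] at *; exact le_trans h hx)]
      exact ih v
    · have hl : A.getD i 0 < v := lt_of_not_ge h
      simp only [List.getD_eq_getElem?_getD] at h hl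
      simp [visL, List.dropWhile_cons, List.find?_cons, h, hl]

theorem keyR (A : List Int) : ∀ (k : Nat), k ≤ A.length → ∀ (v : Int),
    ((visR A k).dropWhile (fun j => decide (A.getD j 0 ≥ v))).head?
      = (List.range' (A.length - k) k).find? (fun j => decide (A.getD j 0 < v)) := by
  intro k
  induction k with
  | zero => intro _ v; rfl
  | succ k ih =>
    intro hk v
    have h1 : A.length - (k+1) = A.length - 1 - k := by omega
    have h2 : (A.length - 1 - k) + 1 = A.length - k := by omega
    rw [List.range'_succ, h1, h2]
    by_cases h : A.getD (A.length - 1 - k) 0 ≥ v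
    · have hnl : ¬ (A.getD (A.length - 1 - k) 0 < v) := not_lt.mpr h
      simp only [visR, List.dropWhile_cons, List.find?_cons, decide_eq_true_eq, h, hnl,
        if_true, decide_true, decide_false]
      rw [dropWhile_dropWhile (fun j => decide (A.getD j 0 ≥ v))
        (fun j => decide (A.getD j 0 ≥ A.getD (A.length - 1 - k) 0))
        (by intro x hx; simp only [decide_eq_true_eq] at *; exact le_trans h hx)]
      exact ih (by omega) v
    · have hl : A.getD (A.length - 1 - k) 0 < v := lt_of_not_ge h
      simp only [List.getD_eq_getElem?_getD] at h hl
      simp [visR, List.dropWhile_cons, List.find?_cons, h, hl]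

-- specification of prev_greater[i] / next_greater[i]
def pgI (A : List Int) (i : Nat) : Int :=
  match (List.range i).reverse.find? (fun j => decide (A.getD j 0 < A.getD i 0)) with
  | some j => (j : Int)
  | none => -1

def ngI (A : List Int) (i : Nat) : Int :=
  match (List.range' (i+1) (A.length - (i+1))).find? (fun j => decide (A.getD j 0 < A.getD i 0)) with
  | some j => (j : Int)
  | none => (A.length : Int)

theorem foldL (A : List Int) : ∀ (i : Nat), i ≤ A.length →
    (((List.range i).foldl (stepPG A) (List.replicate A.length (-1), [])).2 = visL A i
    ∧ ((List.range i).foldl (stepPG A) (List.replicate A.length (-1), [])).1.length = A.length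
    ∧ ∀ j, j < A.length →
        ((List.range i).foldl (stepPG A) (List.replicate A.length (-1), [])).1.getD j 0
          = if j < i then pgI A j else -1) := by
  intro i
  induction i with
  | zero =>
    intro _
    refine ⟨rfl, by simp, ?_⟩
    intro j hj
    simp [List.getD_eq_getElem?_getD, hj]
  | succ i ih =>
    intro hi
    obtain ⟨h2, hlen, harr⟩ := ih (by omega)
    set P := (List.range i).foldl (stepPG A) (List.replicate A.length (-1), []) with hP
    have hfold : (List.range (i+1)).foldl (stepPG A) (List.replicate A.length (-1), [])
        = stepPG A P i := by
      rw [List.range_succ, List.foldl_append, List.foldl_cons, List.foldl_nil]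
    have hpop : popWhile A (A.getD i 0) P.2
        = (visL A i).dropWhile (fun j => decide (A.getD j 0 ≥ A.getD i 0)) := by
      rw [h2, popWhile_eq_dropWhile]
    have hkey := keyL A i (A.getD i 0)
    refine ⟨?_, ?_, ?_⟩
    · rw [hfold]
      show i :: popWhile A (A.getD i 0) P.2 = visL A (i+1)
      rw [hpop]
      rfl
    · rw [hfold]
      show (match popWhile A (A.getD i 0) P.2 with
            | [] => P.1 | j :: _ => P.1.set i (j : Int)).length = A.length
      rcases popWhile A (A.getD i 0) P.2 with _ | ⟨j0, rest⟩
      · exact hlen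
      · simp [hlen]
    · intro j hj
      rw [hfold]
      show (match popWhile A (A.getD i 0) P.2 with
            | [] => P.1 | j :: _ => P.1.set i (j : Int)).getD j 0
          = if j < i + 1 then pgI A j else -1
      rcases hpw : popWhile A (A.getD i 0) P.2 with _ | ⟨j0, rest⟩
      · have hfind : (List.range i).reverse.find? (fun k => decide (A.getD k 0 < A.getD i 0))
            = none := by
          rw [← hkey, ← hpop, hpw]
          rfl
        rcases Nat.lt_or_ge j i with hj2 | hj2
        · rw [harr j hj, if_pos hj2, if_pos (by omega)]
        · rcases Nat.eq_or_lt_of_le hj2 with hj3 | hj3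
          · subst hj3
            rw [harr i hj, if_neg (by omega), if_pos (by omega)]
            unfold pgI
            rw [hfind]
          · rw [harr j hj, if_neg (by omega), if_neg (by omega)]
      · have hfind : (List.range i).reverse.find? (fun k => decide (A.getD k 0 < A.getD i 0))
            = some j0 := by
          rw [← hkey, ← hpop, hpw]
          rfl
        rw [List.getD_eq_getElem?_getD, List.getElem?_set]
        by_cases hji : i = j
        · subst hji
          rw [if_pos rfl, if_pos (hlen ▸ hj), if_pos (by omega)]
          unfold pgI
          rw [hfind]
          rfl
        · rw [if_neg hji, ← List.getD_eq_getElem?_getD, harr j hj]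
          rcases Nat.lt_or_ge j i with hj2 | hj2
          · rw [if_pos hj2, if_pos (by omega)]
          · rw [if_neg (by omega), if_neg (by omega)]

theorem foldR (A : List Int) : ∀ (k : Nat), k ≤ A.length →
    ((((List.range A.length).reverse.take k).foldl (stepPG A) (List.replicate A.length (A.length : Int), [])).2 = visR A k
    ∧ (((List.range A.length).reverse.take k).foldl (stepPG A) (List.replicate A.length (A.length : Int), [])).1.length = A.length
    ∧ ∀ j, j < A.length →
        (((List.range A.length).reverse.take k).foldl (stepPG A) (List.replicate A.length (A.length : Int), [])).1.getD j 0
          = if A.length - k ≤ j then ngI A j else (A.length : Int)) := by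
  intro k
  induction k with
  | zero =>
    intro _
    refine ⟨rfl, by simp, ?_⟩
    intro j hj
    rw [if_neg (by omega)]
    simp [List.getD_eq_getElem?_getD, hj]
  | succ k ih =>
    intro hk
    obtain ⟨h2, hlen, harr⟩ := ih (by omega)
    set P := ((List.range A.length).reverse.take k).foldl (stepPG A)
      (List.replicate A.length (A.length : Int), []) with hP
    have htake : (List.range A.length).reverse.take (k+1)
        = (List.range A.length).reverse.take k ++ [A.length - 1 - k] := by
      rw [List.take_succ]
      congr
      rw [List.getElem?_eq_getElem (by simp; omega)]
      simp [List.getElem_reverse, List.getElem_range]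
    have hfold : ((List.range A.length).reverse.take (k+1)).foldl (stepPG A)
        (List.replicate A.length (A.length : Int), []) = stepPG A P (A.length - 1 - k) := by
      rw [htake, List.foldl_append, List.foldl_cons, List.foldl_nil]
    have hpop : popWhile A (A.getD (A.length - 1 - k) 0) P.2
        = (visR A k).dropWhile (fun j => decide (A.getD j 0 ≥ A.getD (A.length - 1 - k) 0)) := by
      rw [h2, popWhile_eq_dropWhile]
    have hkey := keyR A k (by omega) (A.getD (A.length - 1 - k) 0)
    have e1 : (A.length - 1 - k) + 1 = A.length - k := by omega
    have e2 : A.length - (A.length - k) = k := by omega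
    refine ⟨?_, ?_, ?_⟩
    · rw [hfold]
      show (A.length - 1 - k) :: popWhile A (A.getD (A.length - 1 - k) 0) P.2 = visR A (k+1)
      rw [hpop]
      rfl
    · rw [hfold]
      show (match popWhile A (A.getD (A.length - 1 - k) 0) P.2 with
            | [] => P.1 | j :: _ => P.1.set (A.length - 1 - k) (j : Int)).length = A.length
      rcases popWhile A (A.getD (A.length - 1 - k) 0) P.2 with _ | ⟨j0, rest⟩
      · exact hlen
      · simp [hlen]
    · intro j hj
      rw [hfold]
      show (match popWhile A (A.getD (A.length - 1 - k) 0) P.2 with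
            | [] => P.1 | j :: _ => P.1.set (A.length - 1 - k) (j : Int)).getD j 0
          = if A.length - (k+1) ≤ j then ngI A j else (A.length : Int)
      rcases hpw : popWhile A (A.getD (A.length - 1 - k) 0) P.2 with _ | ⟨j0, rest⟩
      · have hfind : (List.range' (A.length - k) k).find?
            (fun m => decide (A.getD m 0 < A.getD (A.length - 1 - k) 0)) = none := by
          rw [← hkey, ← hpop, hpw]
          rfl
        rcases Nat.lt_or_ge j (A.length - 1 - k) with hj2 | hj2
        · rw [harr j hj, if_neg (by omega), if_neg (by omega)]
        · rcases Nat.eq_or_lt_of_le hj2 with hj3 | hj3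
          · subst hj3
            rw [harr _ hj, if_neg (by omega), if_pos (by omega)]
            unfold ngI
            rw [e1, e2, hfind]
          · rw [harr j hj, if_pos (by omega), if_pos (by omega)]
      · have hfind : (List.range' (A.length - k) k).find?
            (fun m => decide (A.getD m 0 < A.getD (A.length - 1 - k) 0)) = some j0 := by
          rw [← hkey, ← hpop, hpw]
          rfl
        rw [List.getD_eq_getElem?_getD, List.getElem?_set]
        by_cases hji : A.length - 1 - k = j
        · subst hji
          rw [if_pos rfl, if_pos (by rw [hlen]; omega), if_pos (by omega)]
          unfold ngI
          rw [e1, e2, hfind]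
          rfl
        · rw [if_neg hji, ← List.getD_eq_getElem?_getD, harr j hj]
          rcases Nat.lt_or_ge j (A.length - 1 - k) with hj2 | hj2
          · rw [if_neg (by omega), if_neg (by omega)]
          · rw [if_pos (by omega), if_pos (by omega)]

theorem not_lt_decide (v x : Int) : (!decide (x < v)) = decide (x ≥ v) := by
  by_cases h : x < v
  · simp [h, not_le.mpr h]
  · simp [h, not_lt.mp h]

theorem bridgeL (A : List Int) (i : Nat) (hi : i < A.length) :
    (i : Int) - pgI A i = 1 + (cntGe ((A.take i).reverse) (A.getD i 0) : Int) := by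
  set v := A.getD i 0 with hv
  have hmap : (List.range i).reverse.map (fun j => A.getD j 0) = (A.take i).reverse := by
    rw [List.map_reverse]
    congr 1
    apply List.ext_getElem
    · simp; omega
    · intro k h1 h2
      simp only [List.getElem_map, List.getElem_range, List.getElem_take]
      exact List.getD_eq_getElem _ _ (by simp at h1 ⊢; omega)
  have htw : cntGe ((A.take i).reverse) v
      = ((List.range i).reverse.takeWhile (fun j => decide (A.getD j 0 ≥ v))).length := by
    rw [cntGe_eq, ← hmap, List.takeWhile_map, List.length_map]
    rfl
  have htle : ((List.range i).reverse.takeWhile (fun j => decide (A.getD j 0 ≥ v))).length ≤ i := by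
    have := (List.takeWhile_sublist (l := (List.range i).reverse)
      (fun j => decide (A.getD j 0 ≥ v))).length_le
    simpa using this
  set t := ((List.range i).reverse.takeWhile (fun j => decide (A.getD j 0 ≥ v))).length with ht
  have hfun : (fun j => !(fun j => decide (A.getD j 0 < v)) j) = (fun j => decide (A.getD j 0 ≥ v)) := by
    funext j; exact not_lt_decide v (A.getD j 0)
  have hfind : (List.range i).reverse.find? (fun j => decide (A.getD j 0 < v))
      = ((List.range i).reverse)[t]? := by
    rw [find?_eq_head?_dropWhile, hfun, dropWhile_eq_drop, ← ht, List.head?_drop]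
  by_cases hti : t < i
  · have hsome : ((List.range i).reverse)[t]? = some (i - 1 - t) := by
      rw [List.getElem?_eq_getElem (by simp [hti])]
      simp [List.getElem_reverse, List.getElem_range]
    rw [htw]
    unfold pgI
    rw [← hv, hfind, hsome]
    simp only []
    omega
  · have ht' : t = i := by omega
    have hnone : ((List.range i).reverse)[t]? = none := by
      rw [List.getElem?_eq_none]; simp [ht']
    rw [htw]
    unfold pgI
    rw [← hv, hfind, hnone]
    simp only []
    omega

theorem bridgeR (A : List Int) (i : Nat) (hi : i < A.length) :
    ngI A i - (i : Int) = 1 + (cntGe (A.drop (i+1)) (A.getD i 0) : Int) := by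
  set v := A.getD i 0 with hv
  set m := A.length - (i+1) with hm
  have hmap : (List.range' (i+1) m).map (fun j => A.getD j 0) = A.drop (i+1) := by
    apply List.ext_getElem
    · simp; omega
    · intro k h1 h2
      simp only [List.getElem_map, List.getElem_range', List.getElem_drop, one_mul]
      exact List.getD_eq_getElem _ _ (by simp at h1 ⊢; omega)
  have htw : cntGe (A.drop (i+1)) v
      = ((List.range' (i+1) m).takeWhile (fun j => decide (A.getD j 0 ≥ v))).length := by
    rw [cntGe_eq, ← hmap, List.takeWhile_map, List.length_map]
    rfl
  have htle : ((List.range' (i+1) m).takeWhile (fun j => decide (A.getD j 0 ≥ v))).length ≤ m := by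
    have := (List.takeWhile_sublist (l := List.range' (i+1) m)
      (fun j => decide (A.getD j 0 ≥ v))).length_le
    simpa using this
  set t := ((List.range' (i+1) m).takeWhile (fun j => decide (A.getD j 0 ≥ v))).length with ht
  have hfun : (fun j => !(fun j => decide (A.getD j 0 < v)) j) = (fun j => decide (A.getD j 0 ≥ v)) := by
    funext j; exact not_lt_decide v (A.getD j 0)
  have hfind : (List.range' (i+1) m).find? (fun j => decide (A.getD j 0 < v))
      = (List.range' (i+1) m)[t]? := by
    rw [find?_eq_head?_dropWhile, hfun, dropWhile_eq_drop, ← ht, List.head?_drop]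
  by_cases hti : t < m
  · have hsome : (List.range' (i+1) m)[t]? = some (i + 1 + t) := by
      rw [List.getElem?_eq_getElem (by simp [hti])]
      simp [List.getElem_range']
    rw [htw]
    unfold ngI
    rw [← hv, ← hm, hfind, hsome]
    simp only []
    omega
  · have ht' : t = m := by omega
    have hnone : (List.range' (i+1) m)[t]? = none := by
      rw [List.getElem?_eq_none]; simp [ht']
    rw [htw]
    unfold ngI
    rw [← hv, ← hm, hfind, hnone]
    simp only []
    omega

-- ===== VERDICT (by name: the statement is the Claim_ definition above) =====
theorem calculate_min_contributions_spec : Claim_equal_calculate_min_contributions := by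
  intro A _
  unfold Spec_calculate_min_contributions calculate_min_contributions calculate_min_contributions_alt
  apply List.map_congr_left
  intro i hi
  have hi' : i < A.length := List.mem_range.mp hi
  have hprev := (foldL A A.length le_rfl).2.2 i hi'
  have hnext := (foldR A A.length le_rfl).2.2 i hi'
  rw [List.take_of_length_le (by simp)] at hnext
  simp only [if_pos hi', if_pos (by omega : A.length - A.length ≤ i)] at hprev hnext
  rw [hprev, hnext, bridgeL A i hi', bridgeR A i hi']
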